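-- pv_equiv track=rewrite | github.com/jasonpeach29/AdvPy-student | Ex4_4/ex4_4_answer.py | gen_pass
-- ===== SOURCE A (Python) =====
-- import itertools
-- import string
--
-- def gen_pass(minval=3, maxval=4):
--     letters = string.ascii_lowercase
--     numbers = '0123456789'
--     symbols = '!@#'
--     characters = list(letters) + list(numbers) + list(symbols)
--     while maxval >= minval:
--         for p in itertools.product(characters, repeat=maxval):
--             yield ''.join(p)
--         maxval -= 1
-- ===== SOURCE B (Python) =====
-- import string
--
-- def gen_pass(minval=3, maxval=4):
--     characters = string.ascii_lowercase + '0123456789' + '!@#'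
--     for k in range(maxval, minval - 1, -1):
--         acc = ['']
--         for _ in range(k):
--             acc = [s + c for s in acc for c in characters]
--         yield from acc
-- ===== Notes on version B (the rewrite author's own statement) =====
-- stated objective: alternative
-- what changed: Replaces itertools.product and the while-loop-with-decrement by a countdown range over lengths and an iterated list-comprehension fold that extends every prefix by one character per round (rightmost varying fastest, same order).
import Mathlib
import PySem

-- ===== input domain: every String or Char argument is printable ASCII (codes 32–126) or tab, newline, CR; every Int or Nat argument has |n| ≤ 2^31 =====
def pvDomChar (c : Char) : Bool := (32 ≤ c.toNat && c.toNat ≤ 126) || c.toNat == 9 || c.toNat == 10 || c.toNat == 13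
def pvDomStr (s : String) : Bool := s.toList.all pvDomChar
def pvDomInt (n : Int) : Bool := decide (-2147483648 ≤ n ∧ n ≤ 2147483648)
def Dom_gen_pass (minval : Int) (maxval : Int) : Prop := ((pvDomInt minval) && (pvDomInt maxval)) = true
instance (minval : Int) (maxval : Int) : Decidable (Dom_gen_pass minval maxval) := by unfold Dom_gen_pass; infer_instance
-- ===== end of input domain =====

-- B replaces itertools.product and the decrementing while-loop by a countdown range over
-- lengths and an iterated fold that extends every prefix by one character per round
-- (alternative decomposition, same output order). Equivalence is about the list of yielded
-- strings (the generator, fully consumed).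

-- ===== PORT A =====
-- characters = list(ascii_lowercase) + list('0123456789') + list('!@#')
def pvCharsA : List Char := "abcdefghijklmnopqrstuvwxyz0123456789!@#".toList

-- itertools.product(characters, repeat=n), each tuple as its list of characters,
-- in product's order (leftmost position varying slowest).
def pvProdA : Nat → List (List Char)
  | 0 => [[]]
  | n + 1 => pvCharsA.flatMap (fun c => (pvProdA n).map (fun t => c :: t))

-- while maxval >= minval: yield ''.join(p) for each p; maxval -= 1
def gen_pass (minval : Int) (maxval : Int) : List String :=
  if maxval ≥ minval then
    ((pvProdA maxval.toNat).map String.ofList) ++ gen_pass minval (maxval - 1)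
  else []
termination_by (maxval + 1 - minval).toNat
decreasing_by omega

-- ===== PORT B =====
-- characters = ascii_lowercase + '0123456789' + '!@#'  (a string, iterated char by char)
def pvCharsB : List Char := "abcdefghijklmnopqrstuvwxyz0123456789!@#".toList

-- acc = [s + c for s in acc for c in characters]   (strings modelled as List Char, s + c = s ++ [c])
def pvStep (acc : List (List Char)) : List (List Char) :=
  acc.flatMap (fun s => pvCharsB.map (fun c => s ++ [c]))

-- acc = ['']; for _ in range(k): acc = [s + c ...]; then the strings of acc
def pvLenB (k : Int) : List String :=
  ((PySem.List.pyRange 0 k 1).foldl (fun acc _ => pvStep acc) [[]]).map String.ofList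

-- for k in range(maxval, minval - 1, -1): yield from acc
def gen_pass_alt (minval : Int) (maxval : Int) : List String :=
  (PySem.List.pyRange maxval (minval - 1) (-1)).flatMap pvLenB

-- ===== PRECONDITION & SPEC =====
-- Pre_ excludes exactly the inputs where A raises: if minval < 0 and maxval >= minval, the
-- while loop reaches a negative maxval and itertools.product(…, repeat=maxval) raises ValueError.
def Pre_gen_pass (minval : Int) (maxval : Int) : Prop := 0 ≤ minval ∨ maxval < minval
instance (minval : Int) (maxval : Int) : Decidable (Pre_gen_pass minval maxval) := by unfold Pre_gen_pass; infer_instance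

def pvWitness_gen_pass : Int × Int := (2, 3)

def Spec_gen_pass (minval : Int) (maxval : Int) (out : List String) : Prop := out = gen_pass_alt minval maxval
instance (minval : Int) (maxval : Int) (out : List String) : Decidable (Spec_gen_pass minval maxval out) := by unfold Spec_gen_pass; infer_instance

-- ===== CLAIM (what is proved, stated in full; the proofs are below) =====
def Claim_equal_gen_pass : Prop := ∀ (minval : Int) (maxval : Int), Dom_gen_pass minval maxval → Pre_gen_pass minval maxval → Spec_gen_pass minval maxval (gen_pass minval maxval)

-- ===== LEMMAS AND PROOFS =====

-- a fold that ignores the elements is function iteration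
theorem pv_foldl_const {α β : Type} (l : List α) (f : β → β) (init : β) :
    l.foldl (fun acc _ => f acc) init = f^[l.length] init := by
  induction l generalizing init with
  | nil => rfl
  | cons x xs ih => simp [List.foldl_cons, ih, Function.iterate_succ_apply]

-- product's tuples of length n+1 can also be built by extending on the right
theorem pvProdA_succ_right (n : Nat) :
    pvProdA (n + 1) = (pvProdA n).flatMap (fun t => pvCharsA.map (fun c => t ++ [c])) := by
  induction n with
  | zero =>
    rw [pvProdA, pvProdA]
    decide
  | succ m ih =>
    conv_lhs => rw [pvProdA, ih]
    rw [pvProdA]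
    simp [List.map_flatMap, List.flatMap_map, List.flatMap_assoc, Function.comp_def]

-- B's iterated extension step produces exactly product's tuples
theorem pvStep_iterate (n : Nat) : pvStep^[n] [[]] = pvProdA n := by
  induction n with
  | zero => rfl
  | succ m ih =>
    rw [Function.iterate_succ_apply', ih, pvProdA_succ_right]
    rfl

-- B's inner loop for length k equals A's block for repeat = k (k ≥ 0)
theorem pvLenB_eq (k : Int) (hk : 0 ≤ k) :
    pvLenB k = (pvProdA k.toNat).map String.ofList := by
  unfold pvLenB
  rw [pv_foldl_const, PySem.List.length_pyRange_one]
  congr 1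
  rw [pvStep_iterate]
  congr 1
  omega

theorem pv_main (n : Nat) : ∀ (minval maxval : Int), (maxval + 1 - minval).toNat = n →
    (0 ≤ minval ∨ maxval < minval) → gen_pass minval maxval = gen_pass_alt minval maxval := by
  induction n with
  | zero =>
    intro minval maxval hn hpre
    have hlt : maxval < minval := by omega
    rw [gen_pass, if_neg (by omega), gen_pass_alt,
      PySem.List.pyRange_neg_one_eq_nil (by omega : maxval ≤ minval - 1)]
    rfl
  | succ m ih =>
    intro minval maxval hn hpre
    by_cases hge : maxval ≥ minval
    · have hmin : 0 ≤ minval := by omega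
      rw [gen_pass, if_pos hge, gen_pass_alt,
        PySem.List.pyRange_neg_one_cons (by omega : minval - 1 < maxval),
        List.flatMap_cons, pvLenB_eq maxval (by omega),
        ih minval (maxval - 1) (by omega) (Or.inl hmin)]
      rfl
    · rw [gen_pass, if_neg hge, gen_pass_alt,
        PySem.List.pyRange_neg_one_eq_nil (by omega : maxval ≤ minval - 1)]
      rfl

-- ===== VERDICT (by name: the statement is the Claim_ definition above) =====
theorem gen_pass_spec : Claim_equal_gen_pass := by
  intro minval maxval _ hpre
  unfold Spec_gen_pass
  exact pv_main (maxval + 1 - minval).toNat minval maxval rfl hpre
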